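-- pv_equiv track=rewrite | github.com/sid717/CP-practice | Contests/CF-994/problemA.py | all_nonzero_subsequences
-- ===== SOURCE A (Python) =====
-- def all_nonzero_subsequences(arr):
--     subsequences = []
--
--     current_subsequence = []
--     for num in arr:
--         if num != 0:
--             current_subsequence.append(num)
--         else:
--             if current_subsequence:
--                 subsequences.append(current_subsequence)
--             current_subsequence = []
--
--     if current_subsequence:
--         subsequences.append(current_subsequence)
--
--     return subsequences
-- ===== SOURCE B (Python) =====
-- def all_nonzero_subsequences(arr):
--     result = []
--     i = 0
--     n = len(arr)
--     while i < n:
--         if arr[i] == 0: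
--             i += 1
--         else:
--             j = i
--             while j < n and arr[j] != 0:
--                 j += 1
--             result.append(arr[i:j])
--             i = j
--     return result
-- ===== Notes on version B (the rewrite author's own statement) =====
-- stated objective: alternative
-- what changed: Replaces the element-by-element accumulator with end-of-run flushes by a two-pointer index scan that finds each maximal nonzero run and emits it as one slice arr[i:j]; no current-group state or final flush exists.
import Mathlib
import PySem

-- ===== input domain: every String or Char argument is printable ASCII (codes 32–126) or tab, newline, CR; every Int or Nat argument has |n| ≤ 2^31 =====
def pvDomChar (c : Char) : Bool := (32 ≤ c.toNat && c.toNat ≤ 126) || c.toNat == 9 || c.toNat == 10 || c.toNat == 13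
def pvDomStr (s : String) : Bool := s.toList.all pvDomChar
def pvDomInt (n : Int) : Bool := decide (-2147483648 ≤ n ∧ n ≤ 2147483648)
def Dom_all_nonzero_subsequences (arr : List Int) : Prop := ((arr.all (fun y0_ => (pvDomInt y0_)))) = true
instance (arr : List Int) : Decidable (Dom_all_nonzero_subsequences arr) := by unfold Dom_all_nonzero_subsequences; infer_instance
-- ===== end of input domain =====

-- B replaces A's element accumulator with final flush by a two-pointer index scan that emits each
-- maximal nonzero run as one slice arr[i:j]; an alternative of the same cost, same return value.

-- ===== PORT A =====
-- literal port of A's loop: state = (subsequences, current_subsequence), final flush after the fold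
def all_nonzero_subsequences (arr : List Int) : List (List Int) :=
  let st := arr.foldl
    (fun (st : List (List Int) × List Int) num =>
      if num ≠ 0 then (st.1, st.2 ++ [num])
      else ((if st.2 = [] then st.1 else st.1 ++ [st.2]), []))
    ([], [])
  if st.2 = [] then st.1 else st.1 ++ [st.2]

-- ===== PORT B =====
-- inner while loop of B: 'while j < n and arr[j] != 0: j += 1' (arr[j] is in range whenever read)
def pvScan (arr : List Int) (n j : Int) : Int :=
  if j < n ∧ (PySem.List.pyGet? arr j).getD 0 ≠ 0 then pvScan arr n (j + 1) else j
  termination_by (n - j).toNat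
  decreasing_by omega

-- pvScan never moves backwards (needed only for termination of pvOuter)
theorem pvScan_ge (arr : List Int) (n j : Int) : j ≤ pvScan arr n j := by
  fun_induction pvScan arr n j with
  | case1 j h ih => omega
  | case2 j h => omega

-- outer while loop of B: result/i are the loop state, n = len(arr)
def pvOuter (arr : List Int) (n i : Int) (result : List (List Int)) : List (List Int) :=
  if hlt : i < n then
    if (PySem.List.pyGet? arr i).getD 0 = 0 then pvOuter arr n (i + 1) result
    else pvOuter arr n (pvScan arr n i)
           (result ++ [PySem.List.slice arr (some i) (some (pvScan arr n i))])
  else result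
  termination_by (n - i).toNat
  decreasing_by
  · omega
  · have h2 : pvScan arr n i = pvScan arr n (i + 1) := by
      rw [pvScan]; simp_all
    have := pvScan_ge arr n (i + 1)
    omega

def all_nonzero_subsequences_alt (arr : List Int) : List (List Int) :=
  pvOuter arr (arr.length : Int) 0 []

-- ===== PRECONDITION & SPEC =====
def Spec_all_nonzero_subsequences (arr : List Int) (out : List (List Int)) : Prop := out = all_nonzero_subsequences_alt arr
instance (arr : List Int) (out : List (List Int)) : Decidable (Spec_all_nonzero_subsequences arr out) := by unfold Spec_all_nonzero_subsequences; infer_instance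

-- ===== CLAIM (what is proved, stated in full; the proofs are below) =====
def Claim_equal_all_nonzero_subsequences : Prop := ∀ (arr : List Int), Dom_all_nonzero_subsequences arr → Spec_all_nonzero_subsequences arr (all_nonzero_subsequences arr)

-- ===== LEMMAS AND PROOFS =====

-- the common mathematical form both ports are reduced to: the list of maximal nonzero runs
def pvRuns : List Int → List (List Int)
  | [] => []
  | x :: xs =>
    if x = 0 then pvRuns xs
    else (x :: xs.takeWhile (fun y => decide (y ≠ 0))) :: pvRuns (xs.dropWhile (fun y => decide (y ≠ 0)))
  termination_by l => l.length
  decreasing_by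
  · simp
  · have := List.length_dropWhile_le (p := fun y => decide (y ≠ 0)) (l := xs)
    simp only [List.length_cons]; omega

theorem pvRuns_nil : pvRuns [] = [] := by rw [pvRuns]

theorem pvRuns_cons_zero (xs : List Int) : pvRuns (0 :: xs) = pvRuns xs := by
  rw [pvRuns]; simp

theorem pvRuns_cons_nz (x : Int) (xs : List Int) (hx : x ≠ 0) :
    pvRuns (x :: xs) = (x :: xs.takeWhile (fun y => decide (y ≠ 0)))
      :: pvRuns (xs.dropWhile (fun y => decide (y ≠ 0))) := by
  rw [pvRuns]; simp [hx]

-- A's loop body and final flush, named for the proofs (definitionally equal to the port's code)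
def pvStepA (st : List (List Int) × List Int) (num : Int) : List (List Int) × List Int :=
  if num ≠ 0 then (st.1, st.2 ++ [num]) else ((if st.2 = [] then st.1 else st.1 ++ [st.2]), [])

def pvFlush (st : List (List Int) × List Int) : List (List Int) :=
  if st.2 = [] then st.1 else st.1 ++ [st.2]

-- A-side invariant: the fold with accumulator (subs, cur) plus final flush computes pvRuns
theorem pvA_fold (arr : List Int) : ∀ (subs : List (List Int)) (cur : List Int),
    pvFlush (arr.foldl pvStepA (subs, cur))
      = subs ++ (if cur = [] then pvRuns arr
                 else (cur ++ arr.takeWhile (fun y => decide (y ≠ 0)))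
                      :: pvRuns (arr.dropWhile (fun y => decide (y ≠ 0)))) := by
  induction arr with
  | nil =>
    intro subs cur
    by_cases hc : cur = [] <;> simp [pvFlush, pvRuns_nil, hc]
  | cons x xs ih =>
    intro subs cur
    rw [List.foldl_cons]
    by_cases hx : x = 0
    · subst hx
      have hstep : pvStepA (subs, cur) 0 = ((if cur = [] then subs else subs ++ [cur]), []) := by
        simp [pvStepA]
      rw [hstep, ih]
      by_cases hc : cur = []
      · subst hc
        simp [pvRuns_cons_zero]
      · rw [if_pos rfl, if_neg hc, if_neg hc,
            List.takeWhile_cons_of_neg (by simp), List.dropWhile_cons_of_neg (by simp),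
            pvRuns_cons_zero]
        simp
    · have hstep : pvStepA (subs, cur) x = (subs, cur ++ [x]) := by simp [pvStepA, hx]
      rw [hstep, ih, if_neg (by simp : cur ++ [x] ≠ [])]
      by_cases hc : cur = []
      · subst hc
        rw [if_pos rfl, pvRuns_cons_nz x xs hx]
        simp
      · rw [if_neg hc, List.takeWhile_cons_of_pos (by simp [hx]),
            List.dropWhile_cons_of_pos (by simp [hx])]
        simp

theorem pvA_runs (arr : List Int) : all_nonzero_subsequences arr = pvRuns arr := by
  have h : all_nonzero_subsequences arr = pvFlush (arr.foldl pvStepA ([], [])) := rfl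
  rw [h, pvA_fold]
  simp

-- reading arr[i] through pyGet?/getD when 0 ≤ i < len
theorem pvGet_at (arr : List Int) (i : Int) (hi : 0 ≤ i) (h : i < (arr.length : Int)) :
    (PySem.List.pyGet? arr i).getD 0 = arr[i.toNat]'(by omega) := by
  rw [PySem.List.pyGet?_eq_some_getElem arr hi h]
  rfl

theorem pvTake_takeWhile (p : Int → Bool) (l : List Int) :
    l.take (l.takeWhile p).length = l.takeWhile p := by
  induction l with
  | nil => simp
  | cons x xs ih => by_cases h : p x <;> simp [h, ih]

theorem pvDrop_takeWhile (p : Int → Bool) (l : List Int) :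
    l.drop (l.takeWhile p).length = l.dropWhile p := by
  induction l with
  | nil => simp
  | cons x xs ih => by_cases h : p x <;> simp [h, ih]

-- characterization of the inner scan: it stops right after the maximal nonzero run
theorem pvScan_eq (arr : List Int) (k : Nat) : ∀ (j : Int), 0 ≤ j →
    ((arr.length : Int) - j).toNat ≤ k →
    pvScan arr (arr.length : Int) j
      = j + (((arr.drop j.toNat).takeWhile (fun y => decide (y ≠ 0))).length : Int) := by
  induction k with
  | zero =>
    intro j hj hk
    rw [pvScan, if_neg (by omega), List.drop_eq_nil_of_le (by omega)]
    simp
  | succ k ih =>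
    intro j hj hk
    by_cases h : j < (arr.length : Int) ∧ (PySem.List.pyGet? arr j).getD 0 ≠ 0
    · rw [pvScan, if_pos h, ih (j + 1) (by omega) (by omega)]
      have hv : (PySem.List.pyGet? arr j).getD 0 = arr[j.toNat]'(by omega) := pvGet_at arr j hj h.1
      have hd : arr.drop j.toNat = arr[j.toNat]'(by omega) :: arr.drop (j.toNat + 1) :=
        List.drop_eq_getElem_cons (by omega)
      have hjt : (j + 1).toNat = j.toNat + 1 := by omega
      rw [hjt, hd, List.takeWhile_cons_of_pos (by simp; rw [hv] at h; exact h.2)]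
      simp
      omega
    · rw [pvScan, if_neg h]
      by_cases hlt : j < (arr.length : Int)
      · have hv : (PySem.List.pyGet? arr j).getD 0 = arr[j.toNat]'(by omega) := pvGet_at arr j hj hlt
        have hz : arr[j.toNat]'(by omega) = 0 := by
          by_contra hnz
          exact h ⟨hlt, by rw [hv]; exact hnz⟩
        have hd : arr.drop j.toNat = arr[j.toNat]'(by omega) :: arr.drop (j.toNat + 1) :=
          List.drop_eq_getElem_cons (by omega)
        rw [hd, List.takeWhile_cons_of_neg (by simp [hz])]
        simp
      · rw [List.drop_eq_nil_of_le (by omega)]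
        simp

-- B-side invariant: the outer loop appends the runs of the unprocessed suffix
theorem pvOuter_eq (arr : List Int) (k : Nat) : ∀ (i : Int) (result : List (List Int)), 0 ≤ i →
    ((arr.length : Int) - i).toNat ≤ k →
    pvOuter arr (arr.length : Int) i result = result ++ pvRuns (arr.drop i.toNat) := by
  induction k with
  | zero =>
    intro i result hi hk
    rw [pvOuter, dif_neg (by omega), List.drop_eq_nil_of_le (by omega), pvRuns_nil]
    simp
  | succ k ih =>
    intro i result hi hk
    by_cases hlt : i < (arr.length : Int)
    · have hv : (PySem.List.pyGet? arr i).getD 0 = arr[i.toNat]'(by omega) := pvGet_at arr i hi hlt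
      have hd : arr.drop i.toNat = arr[i.toNat]'(by omega) :: arr.drop (i.toNat + 1) :=
        List.drop_eq_getElem_cons (by omega)
      by_cases hz : arr[i.toNat]'(by omega) = 0
      · rw [pvOuter, dif_pos hlt, if_pos (by rw [hv]; exact hz),
            ih (i + 1) result (by omega) (by omega)]
        have hjt : (i + 1).toNat = i.toNat + 1 := by omega
        rw [hjt, hd, hz, pvRuns_cons_zero]
      · set P : Int → Bool := fun y => decide (y ≠ 0) with hP
        have hscan : pvScan arr (arr.length : Int) i
            = i + (((arr.drop i.toNat).takeWhile P).length : Int) :=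
          pvScan_eq arr (k + 1) i hi hk
        have hlen1 : 1 ≤ ((arr.drop i.toNat).takeWhile P).length := by
          rw [hd, List.takeWhile_cons_of_pos (by simp [hP, hz])]
          simp
        have hslice : PySem.List.slice arr (some i) (some (pvScan arr (arr.length : Int) i))
            = (arr.drop i.toNat).takeWhile P := by
          rw [hscan, PySem.List.slice_toNat arr hi (by omega)]
          have : (i + (((arr.drop i.toNat).takeWhile P).length : Int)).toNat - i.toNat
              = ((arr.drop i.toNat).takeWhile P).length := by omega
          rw [this, pvTake_takeWhile]
        rw [pvOuter, dif_pos hlt, if_neg (by rw [hv]; exact hz),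
            ih (pvScan arr (arr.length : Int) i)
               (result ++ [PySem.List.slice arr (some i) (some (pvScan arr (arr.length : Int) i))])
               (by omega) (by omega), hslice]
        have hdrop : arr.drop (pvScan arr (arr.length : Int) i).toNat
            = (arr.drop i.toNat).dropWhile P := by
          rw [hscan, ← pvDrop_takeWhile P (arr.drop i.toNat), List.drop_drop]
          congr 1
          omega
        rw [hdrop]
        conv_rhs => rw [hd, pvRuns_cons_nz _ _ hz]
        rw [hd, List.takeWhile_cons_of_pos (by simp [hP, hz]),
            List.dropWhile_cons_of_pos (by simp [hP, hz])]
        have hPe : (fun y : Int => !decide (y = 0)) = P := by funext y; simp [hP]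
        simp [hPe]
    · rw [pvOuter, dif_neg (by omega), List.drop_eq_nil_of_le (by omega), pvRuns_nil]
      simp

theorem pvB_runs (arr : List Int) : all_nonzero_subsequences_alt arr = pvRuns arr := by
  have := pvOuter_eq arr ((arr.length : Int) - 0).toNat 0 [] (by omega) (by omega)
  simpa [all_nonzero_subsequences_alt] using this

-- ===== VERDICT (by name: the statement is the Claim_ definition above) =====
theorem all_nonzero_subsequences_spec : Claim_equal_all_nonzero_subsequences := by
  intro arr _
  unfold Spec_all_nonzero_subsequences
  rw [pvA_runs, pvB_runs]
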